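-- pv_equiv track=rewrite | github.com/qagustina/python-exercises | Clase04/busqueda_en_listas.py | busqueda_lineal_lordenada
-- ===== SOURCE A (Python) =====
-- def busqueda_lineal_lordenada(lista,e):
--     lista.sort() # ordeno la lista
--     pos = -1
--     for i, z in enumerate(lista):
--         if z == e:
--             pos = i
--         elif z > e:
--             break
--     return pos
-- ===== SOURCE B (Python) =====
-- def busqueda_lineal_lordenada(lista, e):
--     lista.sort()  # keep A's in-place mutation
--     if e in lista:
--         # in a sorted list, the last index of e is (#elements <= e) - 1
--         return sum(1 for x in lista if x <= e) - 1
--     return -1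
-- ===== Notes on version B (the rewrite author's own statement) =====
-- stated objective: simpler
-- what changed: Replaces the enumerate-scan with an early break and a position accumulator by a membership test plus a count of elements <= e (in a sorted list the last index of e is count(<=e)-1).
import Mathlib
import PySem

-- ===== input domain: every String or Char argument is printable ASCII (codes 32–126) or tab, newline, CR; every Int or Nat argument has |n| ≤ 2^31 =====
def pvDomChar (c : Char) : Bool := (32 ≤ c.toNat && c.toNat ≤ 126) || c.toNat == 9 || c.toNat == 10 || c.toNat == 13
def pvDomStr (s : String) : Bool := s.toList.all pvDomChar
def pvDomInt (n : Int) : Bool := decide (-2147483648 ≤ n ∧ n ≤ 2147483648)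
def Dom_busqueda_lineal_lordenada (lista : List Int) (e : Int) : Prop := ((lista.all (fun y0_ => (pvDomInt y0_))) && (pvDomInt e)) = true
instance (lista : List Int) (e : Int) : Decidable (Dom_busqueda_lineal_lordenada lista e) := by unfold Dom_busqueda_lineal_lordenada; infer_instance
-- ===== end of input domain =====

-- B replaces A's enumerate-scan (position accumulator + early break) by a membership
-- test plus a count of elements ≤ e; same cost, simpler. Both Pythons sort the argument
-- in place identically; the equivalence proved is about the return value.

-- ===== PORT A =====
-- the for-loop with `pos` accumulator, early `break` on z > e
def pvLoopA (e : Int) : List Int → Int → Int → Int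
  | [], _, pos => pos
  | z :: rest, i, pos =>
    if z = e then pvLoopA e rest (i + 1) i
    else if e < z then pos
    else pvLoopA e rest (i + 1) pos

def busqueda_lineal_lordenada (lista : List Int) (e : Int) : Int :=
  pvLoopA e (PySem.List.sorted lista (fun x => x) false) 0 (-1)

-- ===== PORT B =====
def busqueda_lineal_lordenada_alt (lista : List Int) (e : Int) : Int :=
  let s := PySem.List.sorted lista (fun x => x) false
  if e ∈ s then ((s.filter (fun x => x ≤ e)).length : Int) - 1 else -1

-- ===== PRECONDITION & SPEC =====
def Spec_busqueda_lineal_lordenada (lista : List Int) (e : Int) (out : Int) : Prop := out = busqueda_lineal_lordenada_alt lista e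
instance (lista : List Int) (e : Int) (out : Int) : Decidable (Spec_busqueda_lineal_lordenada lista e out) := by unfold Spec_busqueda_lineal_lordenada; infer_instance

-- ===== CLAIM (what is proved, stated in full; the proofs are below) =====
def Claim_equal_busqueda_lineal_lordenada : Prop := ∀ (lista : List Int) (e : Int), Dom_busqueda_lineal_lordenada lista e → Spec_busqueda_lineal_lordenada lista e (busqueda_lineal_lordenada lista e)

-- ===== LEMMAS AND PROOFS =====

-- when e does not occur, the accumulator is never updated
theorem pvLoopA_not_mem (e : Int) (s : List Int) (h : e ∉ s) :
    ∀ i pos, pvLoopA e s i pos = pos := by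
  induction s with
  | nil => intro i pos; rfl
  | cons z rest ih =>
    intro i pos
    have hz : z ≠ e := fun hze => h (hze ▸ List.mem_cons_self)
    have hr : e ∉ rest := fun hm => h (List.mem_cons_of_mem _ hm)
    simp only [pvLoopA, if_neg hz]
    split
    · rfl
    · exact ih hr _ _

-- when e occurs in a sorted list, the loop returns i + (#elements ≤ e) - 1
theorem pvLoopA_mem (e : Int) : ∀ (s : List Int), s.Pairwise (· ≤ ·) → e ∈ s →
    ∀ i pos, pvLoopA e s i pos = i + ((s.filter (fun x => x ≤ e)).length : Int) - 1 := by
  intro s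
  induction s with
  | nil => intro _ hm; exact absurd hm (List.not_mem_nil)
  | cons z rest ih =>
    intro hp hm i pos
    have hle : ∀ x ∈ rest, z ≤ x := fun x hx => List.rel_of_pairwise_cons hp hx
    by_cases hz : z = e
    · subst hz
      have hf : (z :: rest).filter (fun x => x ≤ z) = z :: rest.filter (fun x => x ≤ z) := by
        simp
      by_cases hmr : z ∈ rest
      · simp only [pvLoopA, if_pos rfl]
        rw [ih hp.tail hmr, hf]
        push_cast [List.length_cons]
        ring
      · have hfr : rest.filter (fun x => x ≤ z) = [] := by
          rw [List.filter_eq_nil_iff]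
          intro x hx hxe
          have := hle x hx
          have : x = z := le_antisymm (by simpa using hxe) this
          exact hmr (this ▸ hx)
        simp only [pvLoopA, if_pos rfl]
        rw [pvLoopA_not_mem z rest hmr, hf, hfr]
        simp
    · have hm' : e ∈ rest := by
        rcases List.mem_cons.mp hm with h | h
        · exact absurd h.symm hz
        · exact h
      have hze : z ≤ e := hle e hm'
      have hnlt : ¬ e < z := not_lt.mpr hze
      have hf : (z :: rest).filter (fun x => x ≤ e) = z :: rest.filter (fun x => x ≤ e) := by
        simp [hze]
      simp only [pvLoopA, if_neg hz, if_neg hnlt]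
      rw [ih hp.tail hm', hf]
      push_cast [List.length_cons]
      ring

-- ===== VERDICT (by name: the statement is the Claim_ definition above) =====
theorem busqueda_lineal_lordenada_spec : Claim_equal_busqueda_lineal_lordenada := by
  intro lista e _
  unfold Spec_busqueda_lineal_lordenada busqueda_lineal_lordenada busqueda_lineal_lordenada_alt
  set s := PySem.List.sorted lista (fun x => x) false with hs
  by_cases hm : e ∈ s
  · have hp : s.Pairwise (· ≤ ·) := by
      simpa using PySem.List.sorted_pairwise (xs := lista) (key := fun x => x)
    rw [pvLoopA_mem e s hp hm 0 (-1)]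
    simp [hm]
  · rw [pvLoopA_not_mem e s hm 0 (-1)]
    simp [hm]
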